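-- pv_equiv track=rewrite | github.com/Serj1c/ya-algos | theory/7-event_sorting.py | timewithvisitors
-- ===== SOURCE A (Python) =====
-- def timewithvisitors(n, tin, tout):
--     events = []
--     for i in range(n):
--         events.append((tin[i], -1))
--         events.append((tout[i], 1))
--     events.sort()
--
--     online = 0
--     notemtytime = 0
--     for i in range(len(events)):
--         if online > 0:
--             notemtytime += events[i][0] - events[i-1][0]
--         if events[i][1] == -1:
--             online += 1
--         else:
--             online -= 1
--
--     return notemtytime
-- ===== SOURCE B (Python) =====
-- def _count_le(xs, x):
--     # binary search on sorted xs: number of elements <= x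
--     lo, hi = 0, len(xs)
--     while lo < hi:
--         mid = (lo + hi) // 2
--         if xs[mid] <= x:
--             lo = mid + 1
--         else:
--             hi = mid
--     return lo
--
-- def timewithvisitors(n, tin, tout):
--     arr = sorted(tin[i] for i in range(n))
--     dep = sorted(tout[i] for i in range(n))
--     times = sorted(set(arr) | set(dep))
--     total = 0
--     for u, v in zip(times, times[1:]):
--         if _count_le(arr, u) > _count_le(dep, u):
--             total += v - u
--     return total
-- ===== Notes on version B (the rewrite author's own statement) =====
-- stated objective: alternative
-- what changed: B drops the event sweep entirely: it sorts arrivals and departures, takes the sorted set of distinct times, and for each gap between consecutive distinct times decides occupancy by a hand-written binary search counting arrivals<=u versus departures<=u in the two sorted lists -- no tagged event list, no running online counter, no sweep state.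
import Mathlib
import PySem

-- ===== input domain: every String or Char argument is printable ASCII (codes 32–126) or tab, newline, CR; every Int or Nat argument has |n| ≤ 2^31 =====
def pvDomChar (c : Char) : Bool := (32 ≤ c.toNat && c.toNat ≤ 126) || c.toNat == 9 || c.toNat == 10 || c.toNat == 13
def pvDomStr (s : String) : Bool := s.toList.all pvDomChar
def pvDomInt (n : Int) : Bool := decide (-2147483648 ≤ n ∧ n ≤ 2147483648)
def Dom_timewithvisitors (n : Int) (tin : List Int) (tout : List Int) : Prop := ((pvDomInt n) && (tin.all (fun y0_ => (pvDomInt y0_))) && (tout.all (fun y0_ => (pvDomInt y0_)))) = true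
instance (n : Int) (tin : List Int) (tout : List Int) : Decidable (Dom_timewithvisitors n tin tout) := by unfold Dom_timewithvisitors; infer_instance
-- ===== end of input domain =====

-- B replaces A's tagged-event sweep (sort 2n tuples, running online counter) by coordinate
-- compression: per gap between consecutive distinct times it decides occupancy with a binary
-- search counting arrivals/departures ≤ u (objective: alternative; same asymptotic cost).

-- ===== PORT A =====
-- 'for i in range(n): events.append((tin[i], -1)); events.append((tout[i], 1))'
def pvBuildEvents (n : Int) (tin : List Int) (tout : List Int) : List (Int × Int) :=
  (PySem.List.pyRange 0 n 1).foldl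
    (fun acc i =>
      (acc ++ [(PySem.List.pyGetD tin i 0, (-1 : Int))]) ++ [(PySem.List.pyGetD tout i 0, (1 : Int))])
    []

-- the second loop: state (online, notemtytime), indexed access events[i] / events[i-1]
def pvSweepA (events : List (Int × Int)) : Int :=
  ((PySem.List.pyRange 0 (events.length : Int) 1).foldl
    (fun (st : Int × Int) i =>
      let t' := if st.1 > 0 then
          st.2 + ((PySem.List.pyGetD events i ((0 : Int), (0 : Int))).1
                  - (PySem.List.pyGetD events (i - 1) ((0 : Int), (0 : Int))).1)
        else st.2
      let o' := if (PySem.List.pyGetD events i ((0 : Int), (0 : Int))).2 = -1 then st.1 + 1 else st.1 - 1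
      (o', t'))
    ((0 : Int), (0 : Int))).2

def timewithvisitors (n : Int) (tin : List Int) (tout : List Int) : Int :=
  pvSweepA (PySem.List.sorted2 (pvBuildEvents n tin tout) (fun e => e.1) (fun e => e.2))

-- ===== PORT B =====
-- _count_le of Source B: the hand-written binary search 'while lo < hi: …', returning lo
def pvCountLE (xs : List Int) (x : Int) (lo hi : Int) : Int :=
  if _h : lo < hi then
    if PySem.List.pyGetD xs (PySem.Int.floordiv (lo + hi) 2) 0 ≤ x then
      pvCountLE xs x (PySem.Int.floordiv (lo + hi) 2 + 1) hi
    else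
      pvCountLE xs x lo (PySem.Int.floordiv (lo + hi) 2)
  else lo
  termination_by (hi - lo).toNat
  decreasing_by
  · have h1 := (PySem.Int.floordiv_two_mid_bounds (lo := lo) (hi := hi) (by omega)).1
    omega
  · have h2 : PySem.Int.floordiv (lo + hi) 2 < hi := by
      rw [PySem.Int.floordiv_lt_iff_lt_mul (by omega)]; omega
    omega

def timewithvisitors_alt (n : Int) (tin : List Int) (tout : List Int) : Int :=
  let arr := PySem.List.sorted ((PySem.List.pyRange 0 n 1).map (fun i => PySem.List.pyGetD tin i 0)) (fun x => x)
  let dep := PySem.List.sorted ((PySem.List.pyRange 0 n 1).map (fun i => PySem.List.pyGetD tout i 0)) (fun x => x)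
  let times := PySem.List.sorted (PySem.Set.union (PySem.Set.ofList arr) (PySem.Set.ofList dep)) (fun x => x)
  (times.zip (PySem.List.slice times (some 1) none)).foldl
    (fun total uv =>
      if pvCountLE arr uv.1 0 (arr.length : Int) > pvCountLE dep uv.1 0 (dep.length : Int)
      then total + (uv.2 - uv.1) else total) 0

-- ===== PRECONDITION & SPEC =====
-- Pre_ excludes exactly n > len(tin) or n > len(tout), where A raises IndexError (B raises too).
def Pre_timewithvisitors (n : Int) (tin : List Int) (tout : List Int) : Prop :=
  n ≤ tin.length ∧ n ≤ tout.length
instance (n : Int) (tin : List Int) (tout : List Int) : Decidable (Pre_timewithvisitors n tin tout) := by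
  unfold Pre_timewithvisitors; infer_instance

def pvWitness_timewithvisitors : Int × List Int × List Int := (2, [1, 6], [3, 8])

def Spec_timewithvisitors (n : Int) (tin : List Int) (tout : List Int) (out : Int) : Prop :=
  out = timewithvisitors_alt n tin tout
instance (n : Int) (tin : List Int) (tout : List Int) (out : Int) : Decidable (Spec_timewithvisitors n tin tout out) := by
  unfold Spec_timewithvisitors; infer_instance

-- ===== CLAIM (what is proved, stated in full; the proofs are below) =====
def Claim_equal_timewithvisitors : Prop := ∀ (n : Int) (tin : List Int) (tout : List Int), Dom_timewithvisitors n tin tout → Pre_timewithvisitors n tin tout → Spec_timewithvisitors n tin tout (timewithvisitors n tin tout)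

-- ===== LEMMAS AND PROOFS =====

-- the merged tagged event list (proof-only): merge of the two sorted lists, arrival first on ties
def pvMergeTag : List Int → List Int → List (Int × Int)
  | [], [] => []
  | a :: arr, [] => (a, -1) :: pvMergeTag arr []
  | [], d :: dep => (d, 1) :: pvMergeTag [] dep
  | a :: arr, d :: dep =>
      if a ≤ d then (a, -1) :: pvMergeTag arr (d :: dep)
      else (d, 1) :: pvMergeTag (a :: arr) dep
  termination_by arr dep => arr.length + dep.length

-- A's sweep as structural recursion carrying the previous timestamp
def pvSweepP : List (Int × Int) → Int → Int → Int → Int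
  | [], _, total, _ => total
  | (t, d) :: rest, online, total, prev =>
      pvSweepP rest (if d = -1 then online + 1 else online - 1)
        (if online > 0 then total + (t - prev) else total) t

-- B's per-gap recursion over the distinct-time list (proof-only)
def pvCnt (xs : List Int) (u : Int) : Int := (xs.countP (fun t => decide (t ≤ u)) : Int)

def pvFB (arr dep : List Int) : List Int → Int
  | u :: v :: rest => (if pvCnt arr u > pvCnt dep u then v - u else 0) + pvFB arr dep (v :: rest)
  | _ => 0

-- bridge: sweep over distinct times with per-time count deltas
def pvG (arr dep : List Int) : List Int → Int → Int → Int
  | [], _, _ => 0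
  | u :: rest, o, p =>
      (if o > 0 then u - p else 0) + pvG arr dep rest (o + (arr.count u : Int) - (dep.count u : Int)) u

theorem pvSweepP_cons (e : Int × Int) (rest : List (Int × Int)) (o t p : Int) :
    pvSweepP (e :: rest) o t p
      = pvSweepP rest (if e.2 = -1 then o + 1 else o - 1)
          (if o > 0 then t + (e.1 - p) else t) e.1 := by
  cases e; rfl

theorem pvSweepP_consA (t0 : Int) (rest : List (Int × Int)) (o t p : Int) :
    pvSweepP ((t0, (-1 : Int)) :: rest) o t p
      = pvSweepP rest (o + 1) (if o > 0 then t + (t0 - p) else t) t0 := by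
  rw [pvSweepP_cons]; simp

theorem pvSweepP_consD (t0 : Int) (rest : List (Int × Int)) (o t p : Int) :
    pvSweepP ((t0, (1 : Int)) :: rest) o t p
      = pvSweepP rest (o - 1) (if o > 0 then t + (t0 - p) else t) t0 := by
  rw [pvSweepP_cons]; simp


theorem pvFlatMap_pair_perm {α β : Type} (l : List α) (f g : α → β) :
    (l.flatMap (fun i => [f i, g i])).Perm (l.map f ++ l.map g) := by
  induction l with
  | nil => simp
  | cons a l ih =>
    simp only [List.flatMap_cons, List.map_cons, List.cons_append]
    refine List.Perm.trans (List.Perm.cons _ (List.Perm.cons _ ih)) ?_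
    exact List.Perm.cons _ List.perm_middle.symm

theorem pvMergeTag_perm (arr dep : List Int) :
    (pvMergeTag arr dep).Perm (arr.map (fun a => (a, -1)) ++ dep.map (fun d => (d, 1))) := by
  fun_induction pvMergeTag arr dep with
  | case1 => simp
  | case2 a arr ih => simpa using ih.cons ((a : Int), (-1 : Int))
  | case3 d dep ih => simpa using ih.cons ((d : Int), (1 : Int))
  | case4 a arr d dep h ih =>
    simp only [List.map_cons, List.cons_append]
    exact ih.cons _
  | case5 a arr d dep h ih =>
    simp only [List.map_cons]
    exact List.Perm.trans (ih.cons _) List.perm_middle.symm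

theorem pvLexLe_of (a b : Int × Int) (h : a.1 < b.1 ∨ (a.1 = b.1 ∧ a.2 ≤ b.2)) :
    (fun a b : Int × Int => toLex a ≤ toLex b) a b := by
  simp only [Prod.Lex.le_iff, ofLex_toLex]
  omega

theorem pvMergeTag_pairwise (arr dep : List Int)
    (ha : arr.Pairwise (· ≤ ·)) (hd : dep.Pairwise (· ≤ ·)) :
    (pvMergeTag arr dep).Pairwise (fun a b : Int × Int => toLex a ≤ toLex b) := by
  fun_induction pvMergeTag arr dep with
  | case1 => simp
  | case2 a arr ih =>
    rw [List.pairwise_cons] at ha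
    rw [List.pairwise_cons]
    refine ⟨?_, ih ha.2 hd⟩
    intro e he
    rcases List.mem_append.mp ((List.Perm.mem_iff (pvMergeTag_perm _ _)).mp he) with h | h
    · simp only [List.mem_map] at h
      obtain ⟨a', ha', rfl⟩ := h
      exact pvLexLe_of _ _ (by have := ha.1 a' ha'; omega)
    · simp at h
  | case3 d dep ih =>
    rw [List.pairwise_cons] at hd
    rw [List.pairwise_cons]
    refine ⟨?_, ih ha hd.2⟩
    intro e he
    rcases List.mem_append.mp ((List.Perm.mem_iff (pvMergeTag_perm _ _)).mp he) with h | h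
    · simp at h
    · simp only [List.mem_map] at h
      obtain ⟨d', hd', rfl⟩ := h
      exact pvLexLe_of _ _ (by have := hd.1 d' hd'; omega)
  | case4 a arr d dep hle ih =>
    rw [List.pairwise_cons] at ha
    rw [List.pairwise_cons]
    refine ⟨?_, ih ha.2 hd⟩
    intro e he
    rcases List.mem_append.mp ((List.Perm.mem_iff (pvMergeTag_perm _ _)).mp he) with h | h
    · simp only [List.mem_map] at h
      obtain ⟨a', ha', rfl⟩ := h
      exact pvLexLe_of _ _ (by have := ha.1 a' ha'; omega)
    · simp only [List.mem_map] at h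
      obtain ⟨d', hd', rfl⟩ := h
      have : d ≤ d' := by
        rcases List.mem_cons.mp hd' with rfl | h'
        · exact le_refl _
        · exact (List.pairwise_cons.mp hd).1 d' h'
      exact pvLexLe_of _ _ (by omega)
  | case5 a arr d dep hle ih =>
    rw [List.pairwise_cons] at hd
    rw [List.pairwise_cons]
    refine ⟨?_, ih ha hd.2⟩
    intro e he
    rcases List.mem_append.mp ((List.Perm.mem_iff (pvMergeTag_perm _ _)).mp he) with h | h
    · simp only [List.mem_map] at h
      obtain ⟨a', ha', rfl⟩ := h
      have : a ≤ a' := by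
        rcases List.mem_cons.mp ha' with rfl | h'
        · exact le_refl _
        · exact (List.pairwise_cons.mp ha).1 a' h'
      exact pvLexLe_of _ _ (by omega)
    · simp only [List.mem_map] at h
      obtain ⟨d', hd', rfl⟩ := h
      exact pvLexLe_of _ _ (by have := hd.1 d' hd'; omega)

theorem pvInsertBy_pairwise {α : Type} (R : α → α → Prop) (before : α → α → Bool)
    (h1 : ∀ a b, before a b = true → R a b) (h2 : ∀ a b, before a b = false → R b a)
    (htr : ∀ a b c, R a b → R b c → R a c)
    (x : α) (ys : List α) (hys : ys.Pairwise R) :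
    (PySem.List.insertBy before x ys).Pairwise R := by
  induction ys with
  | nil => simp [PySem.List.insertBy]
  | cons y ys ih =>
    rw [List.pairwise_cons] at hys
    obtain ⟨hy, hys⟩ := hys
    by_cases hb : before x y = true
    · rw [PySem.List.insertBy, if_pos hb, List.pairwise_cons]
      refine ⟨?_, List.Pairwise.cons hy hys⟩
      intro z hz
      rcases List.mem_cons.mp hz with rfl | hz'
      · exact h1 _ _ hb
      · exact htr _ _ _ (h1 _ _ hb) (hy _ hz')
    · rw [PySem.List.insertBy, if_neg hb, List.pairwise_cons]
      refine ⟨?_, ih hys⟩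
      intro z hz
      rcases (PySem.List.mem_insertBy before x z ys).mp hz with rfl | hzq
      · exact h2 _ _ (by simpa using hb)
      · exact hy _ hzq

theorem pvSorted2_pairwise (es : List (Int × Int)) :
    (PySem.List.sorted2 es (fun e => e.1) (fun e => e.2)).Pairwise
      (fun a b : Int × Int => toLex a ≤ toLex b) := by
  rw [PySem.List.sorted2]
  simp only [if_neg (by decide : ¬ (false = true))]
  have H : ∀ (l : List (Int × Int)) (acc : List (Int × Int)),
      acc.Pairwise (fun a b : Int × Int => toLex a ≤ toLex b) →
      (l.foldl (fun acc x => PySem.List.insertBy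
        (fun a b => decide (a.1 < b.1) || (!decide (b.1 < a.1) && decide (a.2 < b.2))) x acc) acc).Pairwise
        (fun a b : Int × Int => toLex a ≤ toLex b) := by
    intro l
    induction l with
    | nil => intro acc h; simpa using h
    | cons x l ih =>
      intro acc h
      refine ih _ (pvInsertBy_pairwise _ _ ?_ ?_ ?_ _ _ h)
      · intro a b hb
        simp only [Bool.or_eq_true, Bool.and_eq_true, Bool.not_eq_true', decide_eq_true_eq,
          decide_eq_false_iff_not] at hb
        simp only [Prod.Lex.le_iff, ofLex_toLex]
        omega
      · intro a b hb
        simp only [Bool.or_eq_false_iff, Bool.and_eq_false_iff, Bool.not_eq_false',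
          decide_eq_true_eq, decide_eq_false_iff_not] at hb
        simp only [Prod.Lex.le_iff, ofLex_toLex]
        omega
      · intro a b c hab hbc
        exact le_trans hab hbc
  exact H es [] (by simp)

-- the sorted tagged event list IS the two-pointer merge of the two sorted halves
theorem pvSorted2_eq_mergeTag (es : List (Int × Int)) (xs ys : List Int)
    (hperm : es.Perm (xs.map (fun a => (a, -1)) ++ ys.map (fun d => (d, 1)))) :
    PySem.List.sorted2 es (fun e => e.1) (fun e => e.2)
      = pvMergeTag (PySem.List.sorted xs (fun x => x)) (PySem.List.sorted ys (fun x => x)) := by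
  refine PySem.List.eq_of_perm_of_pairwise_le_of_injective
    (toLex : Int × Int → Lex (Int × Int)) (fun _ _ h => h) ?_ (pvSorted2_pairwise es) ?_
  · refine List.Perm.trans (PySem.List.sorted2_perm es (fun e => e.1) (fun e => e.2) false) (List.Perm.trans hperm ?_)
    refine List.Perm.trans (List.Perm.append ?_ ?_) (pvMergeTag_perm _ _).symm
    · exact (PySem.List.sorted_perm xs (fun x => x) false).symm.map _
    · exact (PySem.List.sorted_perm ys (fun x => x) false).symm.map _
  · exact pvMergeTag_pairwise _ _
      (PySem.List.sorted_pairwise xs (fun x => x))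
      (PySem.List.sorted_pairwise ys (fun x => x))

theorem pvMapRange_take (n : Int) (xs : List Int) (h0 : 0 ≤ n) (hx : n ≤ xs.length) :
    (PySem.List.pyRange 0 n 1).map (fun i => PySem.List.pyGetD xs i 0) = xs.take n.toNat := by
    have hlen : ((xs.take n.toNat).length : Int) = n := by
      simp [List.length_take]; omega
    have := PySem.List.map_pyGetD_pyRange_zero' (xs := xs.take n.toNat) (d := 0)
    rw [hlen] at this
    rw [← this]
    refine List.map_congr_left ?_
    intro i hi
    rw [PySem.List.mem_pyRange_one] at hi
    rw [PySem.List.pyGetD_eq_getElem xs 0 hi.1 (by omega),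
        PySem.List.pyGetD_eq_getElem (xs.take n.toNat) 0 hi.1
          (by rw [hlen]; exact hi.2)]
    rw [List.getElem_take]

theorem pvBuildEvents_perm (n : Int) (tin tout : List Int)
    (h0 : 0 ≤ n) (h1 : n ≤ tin.length) (h2 : n ≤ tout.length) :
    (pvBuildEvents n tin tout).Perm
      ((tin.take n.toNat).map (fun a => (a, -1)) ++ (tout.take n.toNat).map (fun d => (d, 1))) := by
  have step : pvBuildEvents n tin tout
      = (PySem.List.pyRange 0 n 1).flatMap
          (fun i => [(PySem.List.pyGetD tin i 0, (-1 : Int)), (PySem.List.pyGetD tout i 0, (1 : Int))]) := by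
    rw [pvBuildEvents]
    simp only [List.append_assoc, List.singleton_append]
    rw [PySem.List.foldl_append_eq_flatMap]
    simp
  rw [step]
  refine List.Perm.trans (pvFlatMap_pair_perm _ _ _) ?_
  rw [← pvMapRange_take n tin h0 h1, ← pvMapRange_take n tout h0 h2]
  simp only [List.map_map, Function.comp_def]
  exact List.Perm.refl _

theorem pvSweepA_eq (ev : List (Int × Int)) :
    ∀ (m k : Nat), ev.length - k = m → k ≤ ev.length → ∀ (o t : Int),
    ((PySem.List.pyRange (k : Int) (ev.length : Int) 1).foldl
      (fun (st : Int × Int) i =>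
        let t' := if st.1 > 0 then
            st.2 + ((PySem.List.pyGetD ev i ((0 : Int), (0 : Int))).1
                    - (PySem.List.pyGetD ev (i - 1) ((0 : Int), (0 : Int))).1)
          else st.2
        let o' := if (PySem.List.pyGetD ev i ((0 : Int), (0 : Int))).2 = -1 then st.1 + 1 else st.1 - 1
        (o', t'))
      ((o : Int), (t : Int))).2
    = pvSweepP (ev.drop k) o t (PySem.List.pyGetD ev ((k : Int) - 1) ((0 : Int), (0 : Int))).1 := by
  intro m
  induction m with
  | zero =>
    intro k hm hk o t
    have hk' : k = ev.length := by omega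
    subst hk'
    rw [PySem.List.pyRange_one_eq_nil (by omega), List.drop_length]
    rfl
  | succ m ih =>
    intro k hm hk o t
    have hlt : k < ev.length := by omega
    have hltI : (k : Int) < (ev.length : Int) := by exact_mod_cast hlt
    rw [PySem.List.pyRange_one_cons hltI, List.foldl_cons]
    have hget : PySem.List.pyGetD ev (k : Int) ((0 : Int), (0 : Int)) = ev[k] := by
      have := PySem.List.pyGetD_eq_getElem ev (i := (k : Int)) ((0 : Int), (0 : Int))
        (by omega) (by exact_mod_cast hlt)
      simpa using this
    rw [show ((k : Int) + 1) = ((k + 1 : Nat) : Int) by push_cast; ring]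
    rw [ih (k + 1) (by omega) (by omega)]
    rw [show ((k + 1 : Nat) : Int) - 1 = (k : Int) by push_cast; ring]
    rw [List.drop_eq_getElem_cons hlt, pvSweepP_cons]
    simp only [hget]

-- count of elements ≤ x once the search interval is empty at position lo
theorem pvCnt_at (xs : List Int) (x : Int) (lo : Int) (h0 : 0 ≤ lo) (hl : lo ≤ (xs.length : Int))
    (hlow : ∀ (i : Nat), (i : Int) < lo → ∀ (h : i < xs.length), xs[i] ≤ x)
    (hhigh : ∀ (i : Nat), lo ≤ (i : Int) → ∀ (h : i < xs.length), ¬ xs[i] ≤ x) :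
    pvCnt xs x = lo := by
  have hk : lo.toNat ≤ xs.length := by omega
  have hsplit := List.take_append_drop lo.toNat xs
  unfold pvCnt
  rw [← hsplit, List.countP_append]
  have h1 : (xs.take lo.toNat).countP (fun t => decide (t ≤ x)) = (xs.take lo.toNat).length := by
    rw [List.countP_eq_length]
    intro a hamem
    obtain ⟨i, hi, rfl⟩ := List.mem_iff_getElem.mp hamem
    have hilen : i < xs.length := by
      have := hi; simp [List.length_take] at this; omega
    rw [List.getElem_take]
    have : (i : Int) < lo := by
      have := hi; simp [List.length_take] at this; omega
    simpa using hlow i this hilen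
  have h2 : (xs.drop lo.toNat).countP (fun t => decide (t ≤ x)) = 0 := by
    rw [List.countP_eq_zero]
    intro a hamem
    obtain ⟨i, hi, rfl⟩ := List.mem_iff_getElem.mp hamem
    have hilen : lo.toNat + i < xs.length := by
      have := hi; simp [List.length_drop] at this; omega
    rw [List.getElem_drop]
    have : lo ≤ ((lo.toNat + i : Nat) : Int) := by push_cast; omega
    simpa using hhigh (lo.toNat + i) this hilen
  rw [h1, h2, List.length_take]
  push_cast
  omega

theorem pvCountLE_eq (xs : List Int) (x : Int) (hs : xs.Pairwise (· ≤ ·)) :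
    ∀ (m : Nat) (lo hi : Int), (hi - lo).toNat ≤ m → 0 ≤ lo → lo ≤ hi → hi ≤ (xs.length : Int) →
    (∀ (i : Nat), (i : Int) < lo → ∀ (h : i < xs.length), xs[i] ≤ x) →
    (∀ (i : Nat), hi ≤ (i : Int) → ∀ (h : i < xs.length), ¬ xs[i] ≤ x) →
    pvCountLE xs x lo hi = pvCnt xs x := by
  intro m
  induction m with
  | zero =>
    intro lo hi hm h0 hlh hhl hlow hhigh
    have heq : lo = hi := by omega
    subst heq
    rw [pvCountLE, dif_neg (by omega)]
    exact (pvCnt_at xs x lo h0 hhl hlow hhigh).symm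
  | succ m ih =>
    intro lo hi hm h0 hlh hhl hlow hhigh
    by_cases hlt : lo < hi
    · rw [pvCountLE, dif_pos hlt]
      have hb := PySem.Int.floordiv_two_mid_bounds (lo := lo) (hi := hi) (by omega)
      have hmidlt : PySem.Int.floordiv (lo + hi) 2 < hi := by
        rw [PySem.Int.floordiv_lt_iff_lt_mul (by omega)]; omega
      set mid := PySem.Int.floordiv (lo + hi) 2 with hmiddef
      have hmidlen : mid.toNat < xs.length := by omega
      have hget : PySem.List.pyGetD xs mid 0 = xs[mid.toNat] := by
        have := PySem.List.pyGetD_eq_getElem xs (i := mid) 0 (by omega) (by omega)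
        simpa using this
      have hmono := List.pairwise_iff_getElem.mp hs
      split_ifs with hcmp
      · rw [hget] at hcmp
        refine ih (mid + 1) hi (by omega) (by omega) (by omega) hhl ?_ hhigh
        intro i hilt hilen
        rcases Nat.lt_or_ge i mid.toNat with hc | hc
        · exact le_trans (hmono i mid.toNat hilen hmidlen hc) hcmp
        · have : i = mid.toNat := by omega
          subst this; exact hcmp
      · rw [hget] at hcmp
        refine ih lo mid (by omega) h0 (by omega) (by omega) hlow ?_
        intro i hile hilen
        rcases Nat.lt_or_ge mid.toNat i with hc | hc
        · have := hmono mid.toNat i hmidlen hilen hc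
          omega
        · have : i = mid.toNat := by omega
          subst this; exact hcmp
    · have heq : lo = hi := by omega
      subst heq
      rw [pvCountLE, dif_neg (by omega)]
      exact (pvCnt_at xs x lo h0 hhl hlow hhigh).symm

-- fold over zipped consecutive pairs = pvFB
theorem pvFold_eq_FB (arr dep : List Int) (ha : arr.Pairwise (· ≤ ·)) (hd : dep.Pairwise (· ≤ ·)) :
    ∀ (ts : List Int) (acc : Int),
    (ts.zip (ts.drop 1)).foldl
      (fun total uv =>
        if pvCountLE arr uv.1 0 (arr.length : Int) > pvCountLE dep uv.1 0 (dep.length : Int)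
        then total + (uv.2 - uv.1) else total) acc
      = acc + pvFB arr dep ts := by
  have hbs : ∀ (xs : List Int), xs.Pairwise (· ≤ ·) → ∀ (u : Int),
      pvCountLE xs u 0 (xs.length : Int) = pvCnt xs u := by
    intro xs hxs u
    refine pvCountLE_eq xs u hxs ((xs.length : Int) - 0).toNat 0 (xs.length : Int) (by omega)
      (by omega) (by omega) (by omega) ?_ ?_
    · intro i hi _; omega
    · intro i hi hlen
      exfalso
      have : (i : Int) < (xs.length : Int) := by exact_mod_cast hlen
      omega
  intro ts
  induction ts with
  | nil => intro acc; simp [pvFB]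
  | cons u rest ih =>
    cases rest with
    | nil => intro acc; simp [pvFB]
    | cons v rest' =>
      intro acc
      have hzip : ((u :: v :: rest').zip ((u :: v :: rest').drop 1))
          = (u, v) :: ((v :: rest').zip ((v :: rest').drop 1)) := by
        simp
      rw [hzip, List.foldl_cons, ih]
      show (if pvCountLE arr u 0 (arr.length : Int) > pvCountLE dep u 0 (dep.length : Int)
          then acc + (v - u) else acc) + pvFB arr dep (v :: rest')
        = acc + pvFB arr dep (u :: v :: rest')
      rw [hbs arr ha u, hbs dep hd u]
      show _ = acc + ((if pvCnt arr u > pvCnt dep u then v - u else 0) + pvFB arr dep (v :: rest'))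
      split_ifs <;> ring

-- elements surviving 'dropWhile (≤ u)' of a sorted list are > u
theorem pvDropWhile_gt (u : Int) : ∀ (arr : List Int), arr.Pairwise (· ≤ ·) →
    ∀ x ∈ arr.dropWhile (fun a => decide (a ≤ u)), u < x := by
  intro arr
  induction arr with
  | nil => intro _ x hx; simp at hx
  | cons a arr ih =>
    intro ha x hx
    rw [List.pairwise_cons] at ha
    by_cases hau : a ≤ u
    · rw [List.dropWhile_cons, if_pos (by simpa using hau)] at hx
      exact ih ha.2 x hx
    · rw [List.dropWhile_cons, if_neg (by simpa using hau)] at hx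
      rcases List.mem_cons.mp hx with rfl | hx'
      · omega
      · have := ha.1 x hx'
        omega

-- length of the ≤-u prefix = multiplicity of u, under a lower bound u
theorem pvTakeWhile_len (u : Int) : ∀ (arr : List Int), arr.Pairwise (· ≤ ·) →
    (∀ x ∈ arr, u ≤ x) →
    ((arr.takeWhile (fun a => decide (a ≤ u))).length : Int) = (arr.count u : Int) := by
  intro arr
  induction arr with
  | nil => intro _ _; simp
  | cons a arr ih =>
    intro ha hlb
    rw [List.pairwise_cons] at ha
    by_cases hau : a ≤ u
    · have hau' : a = u := le_antisymm hau (hlb a List.mem_cons_self)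
      rw [List.takeWhile_cons, if_pos (by simpa using hau)]
      subst hau'
      rw [List.count_cons_self]
      have := ih ha.2 (fun x hx => hlb x (List.mem_cons_of_mem _ hx))
      simp only [List.length_cons]
      push_cast
      omega
    · rw [List.takeWhile_cons, if_neg (by simpa using hau)]
      have : u ∉ a :: arr := by
        intro hmem
        rcases List.mem_cons.mp hmem with rfl | hmem'
        · omega
        · have := ha.1 u hmem'
          have := hlb a List.mem_cons_self
          omega
      rw [List.count_eq_zero.mpr this]
      simp

-- block decomposition of the merge at the minimum time u
theorem pvMergeTag_block (u : Int) : ∀ (arr dep : List Int),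
    (∀ x ∈ arr, u ≤ x) → (∀ x ∈ dep, u ≤ x) →
    pvMergeTag arr dep
      = ((arr.takeWhile (fun a => decide (a ≤ u))).map (fun a => (a, (-1 : Int)))
          ++ (dep.takeWhile (fun d => decide (d ≤ u))).map (fun d => (d, (1 : Int))))
        ++ pvMergeTag (arr.dropWhile (fun a => decide (a ≤ u))) (dep.dropWhile (fun d => decide (d ≤ u))) := by
  intro arr dep
  fun_induction pvMergeTag arr dep with
  | case1 => intro _ _; simp [pvMergeTag]
  | case2 a arr ih =>
    intro hlba hnil
    have ih' := ih (fun x hx => hlba x (List.mem_cons_of_mem _ hx)) hnil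
    by_cases hau : a ≤ u
    · rw [List.takeWhile_cons, if_pos (by simpa using hau),
        List.dropWhile_cons, if_pos (by simpa using hau)]
      simp [pvMergeTag, ih']
    · rw [List.takeWhile_cons, if_neg (by simpa using hau),
        List.dropWhile_cons, if_neg (by simpa using hau)]
      simp [pvMergeTag]
  | case3 d dep ih =>
    intro hnil hlbd
    have ih' := ih hnil (fun x hx => hlbd x (List.mem_cons_of_mem _ hx))
    by_cases hdu : d ≤ u
    · rw [List.takeWhile_cons, if_pos (by simpa using hdu),
        List.dropWhile_cons, if_pos (by simpa using hdu)]
      simp [pvMergeTag, ih']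
    · rw [List.takeWhile_cons, if_neg (by simpa using hdu),
        List.dropWhile_cons, if_neg (by simpa using hdu)]
      simp [pvMergeTag]
  | case4 a arr d dep hle ih =>
    intro hlba hlbd
    by_cases hau : a ≤ u
    · have ih' := ih (fun x hx => hlba x (List.mem_cons_of_mem _ hx)) hlbd
      rw [List.takeWhile_cons (a := a) (l := arr), if_pos (by simpa using hau),
        List.dropWhile_cons (x := a) (xs := arr), if_pos (by simpa using hau)]
      simp [pvMergeTag, hle, ih']
    · have hdu : ¬ d ≤ u := by
        have := hlba a List.mem_cons_self
        omega
      rw [List.takeWhile_cons (a := a) (l := arr), if_neg (by simpa using hau),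
        List.dropWhile_cons (x := a) (xs := arr), if_neg (by simpa using hau),
        List.takeWhile_cons (a := d) (l := dep), if_neg (by simpa using hdu),
        List.dropWhile_cons (x := d) (xs := dep), if_neg (by simpa using hdu)]
      simp [pvMergeTag, hle]
  | case5 a arr d dep hle ih =>
    intro hlba hlbd
    have hda : u ≤ d := hlbd d List.mem_cons_self
    by_cases hdu : d ≤ u
    · have hau : ¬ a ≤ u := by omega
      have ih' := ih hlba (fun x hx => hlbd x (List.mem_cons_of_mem _ hx))
      rw [List.takeWhile_cons (a := a) (l := arr), if_neg (by simpa using hau),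
        List.dropWhile_cons (x := a) (xs := arr), if_neg (by simpa using hau)] at ih'
      rw [List.takeWhile_cons (a := d) (l := dep), if_pos (by simpa using hdu),
        List.dropWhile_cons (x := d) (xs := dep), if_pos (by simpa using hdu),
        List.takeWhile_cons (a := a) (l := arr), if_neg (by simpa using hau),
        List.dropWhile_cons (x := a) (xs := arr), if_neg (by simpa using hau)]
      simp [pvMergeTag, hle, ih']
    · have hau : ¬ a ≤ u := by omega
      rw [List.takeWhile_cons (a := d) (l := dep), if_neg (by simpa using hdu),
        List.dropWhile_cons (x := d) (xs := dep), if_neg (by simpa using hdu),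
        List.takeWhile_cons (a := a) (l := arr), if_neg (by simpa using hau),
        List.dropWhile_cons (x := a) (xs := arr), if_neg (by simpa using hau)]
      simp [pvMergeTag, hle]

theorem pvSweepP_arrs (u : Int) : ∀ (as : List Int) (rest : List (Int × Int)) (o t : Int),
    (∀ a ∈ as, a = u) →
    pvSweepP (as.map (fun a => (a, (-1 : Int))) ++ rest) o t u
      = pvSweepP rest (o + (as.length : Int)) t u := by
  intro as
  induction as with
  | nil => intro rest o t _; simp
  | cons a as ih =>
    intro rest o t h
    obtain rfl : a = u := h a List.mem_cons_self
    rw [List.map_cons, List.cons_append, pvSweepP_consA]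
    simp only [sub_self, add_zero, ite_self]
    rw [ih rest (o + 1) t (fun x hx => h x (List.mem_cons_of_mem _ hx))]
    congr 1
    simp only [List.length_cons]
    push_cast
    ring


theorem pvSweepP_deps (u : Int) : ∀ (ds : List Int) (rest : List (Int × Int)) (o t : Int),
    (∀ d ∈ ds, d = u) →
    pvSweepP (ds.map (fun d => (d, (1 : Int))) ++ rest) o t u
      = pvSweepP rest (o - (ds.length : Int)) t u := by
  intro ds
  induction ds with
  | nil => intro rest o t _; simp
  | cons d ds ih =>
    intro rest o t h
    obtain rfl : d = u := h d List.mem_cons_self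
    rw [List.map_cons, List.cons_append, pvSweepP_consD]
    simp only [sub_self, add_zero, ite_self]
    rw [ih rest (o - 1) t (fun x hx => h x (List.mem_cons_of_mem _ hx))]
    congr 1
    simp only [List.length_cons]
    push_cast
    ring


-- group step: consume the whole block of events at the minimum time u
theorem pvTakeWhile_ne_nil (u : Int) (l : List Int) (hl : l.Pairwise (· ≤ ·)) (hmem : u ∈ l) :
    l.takeWhile (fun a => decide (a ≤ u)) ≠ [] := by
  cases l with
  | nil => simp at hmem
  | cons a l' =>
    have ha : a ≤ u := by
      rcases List.mem_cons.mp hmem with rfl | h'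
      · exact le_refl _
      · exact (List.pairwise_cons.mp hl).1 u h'
    rw [List.takeWhile_cons, if_pos (by simpa using ha)]
    simp

-- group step: consume the whole block of events at the minimum time u
theorem pvGS (u : Int) (arr dep : List Int)
    (ha : arr.Pairwise (· ≤ ·)) (hd : dep.Pairwise (· ≤ ·))
    (hlba : ∀ x ∈ arr, u ≤ x) (hlbd : ∀ x ∈ dep, u ≤ x)
    (hmem : u ∈ arr ∨ u ∈ dep) (o t p : Int) :
    pvSweepP (pvMergeTag arr dep) o t p
      = pvSweepP (pvMergeTag (arr.dropWhile (fun a => decide (a ≤ u))) (dep.dropWhile (fun d => decide (d ≤ u))))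
          (o + (arr.count u : Int) - (dep.count u : Int))
          (if o > 0 then t + (u - p) else t) u := by
  rw [pvMergeTag_block u arr dep hlba hlbd]
  have heqA : ∀ y ∈ arr.takeWhile (fun a => decide (a ≤ u)), y = u := by
    intro y hy
    have hy1 : y ≤ u := by simpa using List.mem_takeWhile_imp hy
    have hy2 : u ≤ y := hlba y ((List.takeWhile_sublist _).subset hy)
    omega
  have heqD : ∀ y ∈ dep.takeWhile (fun d => decide (d ≤ u)), y = u := by
    intro y hy
    have hy1 : y ≤ u := by simpa using List.mem_takeWhile_imp hy
    have hy2 : u ≤ y := hlbd y ((List.takeWhile_sublist _).subset hy)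
    omega
  have hlenA := pvTakeWhile_len u arr ha hlba
  have hlenD := pvTakeWhile_len u dep hd hlbd
  cases hA : arr.takeWhile (fun a => decide (a ≤ u)) with
  | cons a A1' =>
    rw [hA] at hlenA heqA
    have hau : a = u := heqA a List.mem_cons_self
    rw [hau]
    rw [hau] at hA hlenA heqA
    simp only [List.map_cons, List.cons_append, List.append_assoc]
    rw [pvSweepP_consA]
    rw [pvSweepP_arrs u A1' _ (o + 1) _ (fun y hy => heqA y (List.mem_cons_of_mem _ hy))]
    rw [pvSweepP_deps u _ _ _ _ heqD]
    congr 1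
    simp only [List.length_cons] at hlenA
    push_cast at hlenA hlenD ⊢
    omega
  | nil =>
    rw [hA] at hlenA
    have hud : u ∈ dep := by
      rcases hmem with hua | hud
      · exact absurd hA (pvTakeWhile_ne_nil u arr ha hua)
      · exact hud
    obtain ⟨D1', hD1⟩ : ∃ D1', dep.takeWhile (fun d => decide (d ≤ u)) = u :: D1' := by
      cases hD : dep.takeWhile (fun d => decide (d ≤ u)) with
      | nil => exact absurd hD (pvTakeWhile_ne_nil u dep hd hud)
      | cons d0 D1' =>
        have hd0 : d0 = u := heqD d0 (by rw [hD]; exact List.mem_cons_self)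
        exact ⟨D1', by rw [hd0]⟩
    rw [hD1] at hlenD heqD
    rw [hD1]
    simp only [List.map_nil, List.nil_append, List.map_cons, List.cons_append]
    rw [pvSweepP_consD]
    rw [pvSweepP_deps u D1' _ _ _ (fun y hy => heqD y (List.mem_cons_of_mem _ hy))]
    congr 1
    simp only [List.length_cons, List.length_nil] at hlenA hlenD
    push_cast at hlenA hlenD ⊢
    omega


theorem pvG_congr (arr dep arr' dep' : List Int) : ∀ (ts : List Int) (o p : Int),
    (∀ v ∈ ts, arr.count v = arr'.count v ∧ dep.count v = dep'.count v) →
    pvG arr dep ts o p = pvG arr' dep' ts o p := by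
  intro ts
  induction ts with
  | nil => intro o p _; rfl
  | cons u rest ih =>
    intro o p h
    have hu := h u List.mem_cons_self
    simp only [pvG, hu.1, hu.2]
    rw [ih _ _ (fun v hv => h v (List.mem_cons_of_mem _ hv))]

-- MAIN: sweep of the merged event list = pvG over the distinct-time list
theorem pvMain : ∀ (ts arr dep : List Int) (o t p : Int),
    arr.Pairwise (· ≤ ·) → dep.Pairwise (· ≤ ·) → ts.Pairwise (· < ·) →
    (∀ x, x ∈ ts ↔ (x ∈ arr ∨ x ∈ dep)) →
    pvSweepP (pvMergeTag arr dep) o t p = t + pvG arr dep ts o p := by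
  intro ts
  induction ts with
  | nil =>
    intro arr dep o t p _ _ _ hmem
    have harr : arr = [] := by
      cases arr with
      | nil => rfl
      | cons a arr' => exact absurd ((hmem a).mpr (Or.inl List.mem_cons_self)) (by simp)
    have hdep : dep = [] := by
      cases dep with
      | nil => rfl
      | cons d dep' => exact absurd ((hmem d).mpr (Or.inr List.mem_cons_self)) (by simp)
    subst harr; subst hdep
    simp [pvMergeTag, pvSweepP, pvG]
  | cons u ts' ih =>
    intro arr dep o t p ha hd hts hmem
    have hts'pw : ts'.Pairwise (· < ·) := (List.pairwise_cons.mp hts).2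
    have hugt : ∀ x ∈ ts', u < x := (List.pairwise_cons.mp hts).1
    have hlba : ∀ x ∈ arr, u ≤ x := by
      intro x hx
      rcases List.mem_cons.mp ((hmem x).mpr (Or.inl hx)) with rfl | h'
      · exact le_refl _
      · exact le_of_lt (hugt x h')
    have hlbd : ∀ x ∈ dep, u ≤ x := by
      intro x hx
      rcases List.mem_cons.mp ((hmem x).mpr (Or.inr hx)) with rfl | h'
      · exact le_refl _
      · exact le_of_lt (hugt x h')
    have hu : u ∈ arr ∨ u ∈ dep := (hmem u).mp List.mem_cons_self
    rw [pvGS u arr dep ha hd hlba hlbd hu o t p]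
    have ha' : (arr.dropWhile (fun a => decide (a ≤ u))).Pairwise (· ≤ ·) :=
      ha.sublist (List.dropWhile_sublist _)
    have hd' : (dep.dropWhile (fun d => decide (d ≤ u))).Pairwise (· ≤ ·) :=
      hd.sublist (List.dropWhile_sublist _)
    have hmemdw : ∀ (l : List Int), l.Pairwise (· ≤ ·) → ∀ x, u < x →
        (x ∈ l.dropWhile (fun a => decide (a ≤ u)) ↔ x ∈ l) := by
      intro l hl x hux
      constructor
      · intro hx
        exact (List.dropWhile_sublist _).subset hx
      · intro hx
        have := List.takeWhile_append_dropWhile (p := fun a => decide (a ≤ u)) (l := l)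
        rw [← this] at hx
        rcases List.mem_append.mp hx with h1 | h1
        · have : x ≤ u := by simpa using List.mem_takeWhile_imp h1
          omega
        · exact h1
    have hmem' : ∀ x, x ∈ ts' ↔ (x ∈ arr.dropWhile (fun a => decide (a ≤ u))
        ∨ x ∈ dep.dropWhile (fun d => decide (d ≤ u))) := by
      intro x
      constructor
      · intro hx
        have hux := hugt x hx
        rcases (hmem x).mp (List.mem_cons_of_mem _ hx) with h1 | h1
        · exact Or.inl ((hmemdw arr ha x hux).mpr h1)
        · exact Or.inr ((hmemdw dep hd x hux).mpr h1)
      · intro hx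
        rcases hx with h1 | h1
        · have hux := pvDropWhile_gt u arr ha x h1
          have : x ∈ u :: ts' := (hmem x).mpr (Or.inl ((List.dropWhile_sublist _).subset h1))
          rcases List.mem_cons.mp this with rfl | h2
          · omega
          · exact h2
        · have hux := pvDropWhile_gt u dep hd x h1
          have : x ∈ u :: ts' := (hmem x).mpr (Or.inr ((List.dropWhile_sublist _).subset h1))
          rcases List.mem_cons.mp this with rfl | h2
          · omega
          · exact h2
    rw [ih _ _ _ _ _ ha' hd' hts'pw hmem']
    have hcnt : ∀ (l : List Int) (v : Int), u < v →
        l.count v = (l.dropWhile (fun a => decide (a ≤ u))).count v := by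
      intro l v huv
      conv_lhs => rw [← List.takeWhile_append_dropWhile (p := fun a => decide (a ≤ u)) (l := l)]
      rw [List.count_append]
      have : (l.takeWhile (fun a => decide (a ≤ u))).count v = 0 := by
        rw [List.count_eq_zero]
        intro hv
        have : v ≤ u := by simpa using List.mem_takeWhile_imp hv
        omega
      omega
    have hGc : pvG arr dep ts' (o + (arr.count u : Int) - (dep.count u : Int)) u
        = pvG (arr.dropWhile (fun a => decide (a ≤ u))) (dep.dropWhile (fun d => decide (d ≤ u)))
            ts' (o + (arr.count u : Int) - (dep.count u : Int)) u := by
      refine pvG_congr _ _ _ _ ts' _ _ ?_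
      intro v hv
      exact ⟨hcnt arr v (hugt v hv), hcnt dep v (hugt v hv)⟩
    rw [← hGc]
    show _ = t + ((if o > 0 then u - p else 0) + pvG arr dep ts' _ u)
    split_ifs <;> ring

theorem pvCnt_split (arr : List Int) (p u : Int) (hpu : p < u)
    (h : ∀ x ∈ arr, x ≤ p ∨ x = u ∨ u < x) :
    pvCnt arr u = pvCnt arr p + (arr.count u : Int) := by
  induction arr with
  | nil => simp [pvCnt]
  | cons a arr ih =>
    have ha := h a List.mem_cons_self
    have ihh := ih (fun x hx => h x (List.mem_cons_of_mem _ hx))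
    simp only [pvCnt, List.countP_cons, List.count_cons] at *
    rcases ha with h1 | h1 | h1 <;>
      [ (rw [if_pos (by simp; omega), if_pos (by simp; omega), if_neg (by simp; omega)]);
        (subst h1; rw [if_pos (by simp), if_neg (by simp; omega), if_pos (by simp)]);
        (rw [if_neg (by simp; omega), if_neg (by simp; omega), if_neg (by simp; omega)]) ] <;>
      push_cast <;> push_cast at ihh <;> omega

theorem pvCnt_min (arr : List Int) (u : Int) (h : ∀ x ∈ arr, x = u ∨ u < x) :
    pvCnt arr u = (arr.count u : Int) := by
  induction arr with
  | nil => simp [pvCnt]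
  | cons a arr ih =>
    have ha := h a List.mem_cons_self
    have ihh := ih (fun x hx => h x (List.mem_cons_of_mem _ hx))
    simp only [pvCnt, List.countP_cons, List.count_cons] at *
    rcases ha with h1 | h1 <;>
      [ (subst h1; rw [if_pos (by simp), if_pos (by simp)]);
        (rw [if_neg (by simp; omega), if_neg (by simp; omega)]) ] <;>
      push_cast <;> push_cast at ihh <;> omega

theorem pvG_shift (arr dep : List Int) : ∀ (ts : List Int) (o p : Int),
    ts.Pairwise (· < ·) → (∀ x ∈ ts, p < x) →
    (∀ x, (x ∈ arr ∨ x ∈ dep) → x ≤ p ∨ x ∈ ts) →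
    o = pvCnt arr p - pvCnt dep p →
    pvG arr dep ts o p = pvFB arr dep (p :: ts) := by
  intro ts
  induction ts with
  | nil => intro o p _ _ _ _; simp [pvG, pvFB]
  | cons u rest ih =>
    intro o p hpw hgt hcomp ho
    have hrestgt : ∀ x ∈ rest, u < x := (List.pairwise_cons.mp hpw).1
    have hpu : p < u := hgt u List.mem_cons_self
    have hsplit : ∀ (l : List Int), (∀ x ∈ l, x ≤ p ∨ x ∈ u :: rest) →
        pvCnt l u = pvCnt l p + (l.count u : Int) := by
      intro l hl
      refine pvCnt_split l p u hpu ?_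
      intro x hx
      rcases hl x hx with h1 | h1
      · exact Or.inl h1
      · rcases List.mem_cons.mp h1 with rfl | h2
        · exact Or.inr (Or.inl rfl)
        · exact Or.inr (Or.inr (hrestgt x h2))
    have hA := hsplit arr (fun x hx => hcomp x (Or.inl hx))
    have hD := hsplit dep (fun x hx => hcomp x (Or.inr hx))
    show (if o > 0 then u - p else 0) + pvG arr dep rest (o + (arr.count u : Int) - (dep.count u : Int)) u
        = (if pvCnt arr p > pvCnt dep p then u - p else 0) + pvFB arr dep (u :: rest)
    rw [show (if o > 0 then u - p else 0) = (if pvCnt arr p > pvCnt dep p then u - p else 0) by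
      split_ifs with hc1 hc2 hc2 <;> first | rfl | omega]
    congr 1
    refine ih _ u (List.pairwise_cons.mp hpw).2 hrestgt ?_ (by omega)
    intro x hx
    rcases hcomp x hx with h1 | h1
    · exact Or.inl (by omega)
    · rcases List.mem_cons.mp h1 with rfl | h2
      · exact Or.inl (le_refl _)
      · exact Or.inr h2

theorem pvG_top (arr dep : List Int) (ts : List Int) (p : Int)
    (hts : ts.Pairwise (· < ·))
    (hcomp : ∀ x, (x ∈ arr ∨ x ∈ dep) → x ∈ ts) :
    pvG arr dep ts 0 p = pvFB arr dep ts := by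
  cases ts with
  | nil => simp [pvG, pvFB]
  | cons u rest =>
    have hrestgt : ∀ x ∈ rest, u < x := (List.pairwise_cons.mp hts).1
    have hmin : ∀ (l : List Int), (∀ x ∈ l, x ∈ u :: rest) → pvCnt l u = (l.count u : Int) := by
      intro l hl
      refine pvCnt_min l u ?_
      intro x hx
      rcases List.mem_cons.mp (hl x hx) with rfl | h2
      · exact Or.inl rfl
      · exact Or.inr (hrestgt x h2)
    show (if (0 : Int) > 0 then u - p else 0) + pvG arr dep rest (0 + (arr.count u : Int) - (dep.count u : Int)) u
        = pvFB arr dep (u :: rest)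
    rw [if_neg (by omega)]
    rw [pvG_shift arr dep rest _ u (List.pairwise_cons.mp hts).2 hrestgt ?_ ?_]
    · ring
    · intro x hx
      rcases List.mem_cons.mp (hcomp x hx) with rfl | h2
      · exact Or.inl (le_refl _)
      · exact Or.inr h2
    · rw [hmin arr (fun x hx => hcomp x (Or.inl hx)), hmin dep (fun x hx => hcomp x (Or.inr hx))]
      omega

-- ===== VERDICT (by name: the statement is the Claim_ definition above) =====
theorem timewithvisitors_spec : Claim_equal_timewithvisitors := by
  intro n tin tout hdom hpre
  obtain ⟨h1, h2⟩ := hpre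
  unfold Spec_timewithvisitors
  simp only [timewithvisitors, timewithvisitors_alt]
  by_cases hn : 0 ≤ n
  · rw [pvMapRange_take n tin hn h1, pvMapRange_take n tout hn h2]
    set sA := PySem.List.sorted (tin.take n.toNat) (fun x => x) with hsA
    set sD := PySem.List.sorted (tout.take n.toNat) (fun x => x) with hsD
    set ts := PySem.List.sorted (PySem.Set.union (PySem.Set.ofList sA) (PySem.Set.ofList sD)) (fun x => x) with hts
    have haP : sA.Pairwise (· ≤ ·) := PySem.List.sorted_pairwise _ _
    have hdP : sD.Pairwise (· ≤ ·) := PySem.List.sorted_pairwise _ _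
    have htsmem : ∀ x, x ∈ ts ↔ (x ∈ sA ∨ x ∈ sD) := by
      intro x
      rw [hts, PySem.List.mem_sorted, PySem.Set.mem_union, PySem.Set.mem_ofList, PySem.Set.mem_ofList]
    have htsnd : ts.Nodup := by
      have h0 : (PySem.Set.union (PySem.Set.ofList sA) (PySem.Set.ofList sD)).Nodup :=
        PySem.Set.nodup_union _ _ (PySem.Set.nodup_ofList _)
      exact (PySem.List.sorted_perm _ _ false).symm.nodup h0
    have htslt : ts.Pairwise (· < ·) := by
      have hle : ts.Pairwise (· ≤ ·) := PySem.List.sorted_pairwise _ _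
      have htsne : List.Pairwise (fun a b => a ≠ b) ts := htsnd
      rw [List.pairwise_iff_getElem] at hle htsne ⊢
      intro i j hi hj hij
      exact lt_of_le_of_ne (hle i j hi hj hij) (htsne i j hi hj hij)
    -- A side: sorted event list = merge; sweep loop = pvSweepP
    rw [pvSorted2_eq_mergeTag _ (tin.take n.toNat) (tout.take n.toNat)
          (pvBuildEvents_perm n tin tout hn h1 h2)]
    have key := pvSweepA_eq (pvMergeTag sA sD) (pvMergeTag sA sD).length 0 (by omega) (by omega) 0 0
    simp only [Nat.cast_zero, List.drop_zero, zero_sub] at key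
    rw [pvSweepA, key]
    rw [pvMain ts sA sD 0 0 _ haP hdP htslt htsmem]
    rw [pvG_top sA sD ts _ htslt (fun x hx => (htsmem x).mpr hx)]
    -- B side
    rw [PySem.List.slice_from_one, ← List.drop_one]
    rw [pvFold_eq_FB sA sD haP hdP ts 0]
  · have hnil : PySem.List.pyRange 0 n 1 = [] :=
      PySem.List.pyRange_one_eq_nil (by omega)
    simp only [pvBuildEvents, hnil, List.map_nil, List.foldl_nil]
    show pvSweepA (PySem.List.sorted2 [] (fun e => e.1) (fun e => e.2)) = _
    simp only [PySem.List.sorted2, PySem.List.sorted, List.foldl_nil,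
      if_neg (by decide : ¬ (false = true))]
    simp [pvSweepA, PySem.List.pyRange_one_eq_nil, PySem.Set.union, PySem.Set.ofList,
      PySem.List.slice]
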